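-- pv_equiv track=rewrite | github.com/Gagana09/AI_Recipe_generator_and_Nutrient_analyser | backend/app.py | filter_recipes_by_diet
-- ===== SOURCE A (Python) =====
-- DIET_SYNONYMS = {
--     "non-vegetarian": ["non-vegetarian", "nonvegetarian", "non veg", "non-veg", "non vegetarian"],
--     "vegetarian": ["vegetarian"],
--     "keto": ["keto", "ketogenic"],
--     "eggetarian": ["eggetarian"],
--     "sattvik": ["sattvik", "sattvic"],
--     "vegan": ["vegan"],
-- }
--
-- def filter_recipes_by_diet(recipes_list, diet_preferences):
--     if not diet_preferences:
--         return recipes_list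
--     filtered = []
--     for recipe in recipes_list:
--         recipe_diet = str(recipe.get('diet', '')).lower()
--         for pref in diet_preferences:
--             pref = pref.lower()
--             synonyms = DIET_SYNONYMS.get(pref, [pref])
--             if any(syn in recipe_diet for syn in synonyms):
--                 filtered.append(recipe)
--                 break
--     return filtered
-- ===== SOURCE B (Python) =====
-- DIET_SYNONYMS = {
--     "non-vegetarian": ["non-vegetarian", "nonvegetarian", "non veg", "non-veg", "non vegetarian"],
--     "vegetarian": ["vegetarian"],
--     "keto": ["keto", "ketogenic"],
--     "eggetarian": ["eggetarian"],
--     "sattvik": ["sattvik", "sattvic"],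
--     "vegan": ["vegan"],
-- }
--
-- def filter_recipes_by_diet(recipes_list, diet_preferences):
--     if not diet_preferences:
--         return recipes_list
--     # stage 1: lowercase every diet field once
--     diets = [str(r.get('diet', '')).lower() for r in recipes_list]
--     # stage 2: synonym-major scan -- for each synonym, mark the indices of recipes it hits
--     matched = set()
--     for pref in diet_preferences:
--         p = pref.lower()
--         for syn in DIET_SYNONYMS.get(p, [p]):
--             for i, d in enumerate(diets):
--                 if syn in d:
--                     matched.add(i)
--     # stage 3: rebuild the output in input order from the matched index set
--     return [r for i, r in enumerate(recipes_list) if i in matched]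
-- ===== Notes on version B (the rewrite author's own statement) =====
-- stated objective: alternative
-- what changed: B inverts the loop nesting: instead of A's per-recipe scan over preferences/synonyms with break, B lowercases the diet fields and expands the synonym table once, runs a synonym-major pass collecting the set of matched recipe indices, then reconstructs the filtered list in input order from that index set.
import Mathlib
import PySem

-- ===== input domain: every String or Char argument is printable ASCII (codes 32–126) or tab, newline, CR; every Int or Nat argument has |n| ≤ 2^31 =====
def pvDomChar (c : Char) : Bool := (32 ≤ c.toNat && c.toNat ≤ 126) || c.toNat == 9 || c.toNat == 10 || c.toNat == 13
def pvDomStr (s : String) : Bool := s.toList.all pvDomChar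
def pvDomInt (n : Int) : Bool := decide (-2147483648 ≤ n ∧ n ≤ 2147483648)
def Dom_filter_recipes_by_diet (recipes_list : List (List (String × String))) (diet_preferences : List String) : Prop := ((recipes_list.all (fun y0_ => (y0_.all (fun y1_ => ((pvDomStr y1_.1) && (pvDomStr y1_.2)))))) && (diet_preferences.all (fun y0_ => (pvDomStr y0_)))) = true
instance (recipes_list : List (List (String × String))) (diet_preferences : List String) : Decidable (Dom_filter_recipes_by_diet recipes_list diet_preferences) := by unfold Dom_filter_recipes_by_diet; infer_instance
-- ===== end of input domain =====

-- B inverts the loop nesting: a synonym-major pass collects the set of matched recipe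
-- indices, then the output is rebuilt in input order from that set (objective: alternative).

-- ===== PORT A =====
-- module-level constant DIET_SYNONYMS (shared by both programs)
def DIET_SYNONYMS : PySem.Dict String (List String) := PySem.Dict.mk [
  ("non-vegetarian", ["non-vegetarian", "nonvegetarian", "non veg", "non-veg", "non vegetarian"]),
  ("vegetarian", ["vegetarian"]),
  ("keto", ["keto", "ketogenic"]),
  ("eggetarian", ["eggetarian"]),
  ("sattvik", ["sattvik", "sattvic"]),
  ("vegan", ["vegan"])]

-- A's inner 'for pref in diet_preferences: … break' loop
def prefLoopA (diet_preferences : List String) (recipe_diet : String) : Bool :=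
  match diet_preferences with
  | [] => false
  | pref :: rest =>
    let pref := PySem.Str.lower pref
    let synonyms := DIET_SYNONYMS.getD pref [pref]
    if synonyms.any (fun syn => PySem.Str.isIn syn recipe_diet) then true
    else prefLoopA rest recipe_diet

def filter_recipes_by_diet (recipes_list : List (List (String × String))) (diet_preferences : List String) : List (List (String × String)) :=
  if diet_preferences.isEmpty then recipes_list
  else
    recipes_list.foldl (fun filtered recipe =>
      let recipe_diet := PySem.Str.lower ((PySem.Dict.mk recipe).getD "diet" "")
      if prefLoopA diet_preferences recipe_diet then filtered ++ [recipe] else filtered) []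

-- ===== PORT B =====
def filter_recipes_by_diet_alt (recipes_list : List (List (String × String))) (diet_preferences : List String) : List (List (String × String)) :=
  if diet_preferences.isEmpty then recipes_list
  else
    -- stage 1: lowercase every diet field once
    let diets := recipes_list.map (fun r => PySem.Str.lower ((PySem.Dict.mk r).getD "diet" ""))
    -- stage 2: synonym-major scan collecting matched indices into a set
    let matched : PySem.Set Int := diet_preferences.foldl (fun m pref =>
      let p := PySem.Str.lower pref
      (DIET_SYNONYMS.getD p [p]).foldl (fun m syn =>
        (PySem.List.enumerate diets).foldl (fun m id =>
          if PySem.Str.isIn syn id.2 then PySem.Set.add m id.1 else m) m) m) PySem.Set.empty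
    -- stage 3: rebuild the output in input order from the matched index set
    ((PySem.List.enumerate recipes_list).filter (fun ir => PySem.Set.contains matched ir.1)).map (·.2)

-- ===== PRECONDITION & SPEC =====
def Spec_filter_recipes_by_diet (recipes_list : List (List (String × String))) (diet_preferences : List String) (out : List (List (String × String))) : Prop := out = filter_recipes_by_diet_alt recipes_list diet_preferences
instance (recipes_list : List (List (String × String))) (diet_preferences : List String) (out : List (List (String × String))) : Decidable (Spec_filter_recipes_by_diet recipes_list diet_preferences out) := by unfold Spec_filter_recipes_by_diet; infer_instance

-- ===== CLAIM (what is proved, stated in full; the proofs are below) =====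
def Claim_equal_filter_recipes_by_diet : Prop := ∀ (recipes_list : List (List (String × String))) (diet_preferences : List String), Dom_filter_recipes_by_diet recipes_list diet_preferences → Spec_filter_recipes_by_diet recipes_list diet_preferences (filter_recipes_by_diet recipes_list diet_preferences)

-- ===== LEMMAS AND PROOFS =====

-- a fold whose step adds i exactly when P holds: membership characterization (used at all three nesting levels of B)
theorem mem_foldl_iff {α : Type} (g : PySem.Set Int → α → PySem.Set Int) (P : α → Int → Prop)
    (hg : ∀ m x i, i ∈ g m x ↔ i ∈ m ∨ P x i) :
    ∀ (l : List α) (m : PySem.Set Int) (i : Int), i ∈ l.foldl g m ↔ i ∈ m ∨ ∃ x ∈ l, P x i := by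
  intro l
  induction l with
  | nil => simp
  | cons x xs ih =>
    intro m i
    simp only [List.foldl_cons, ih, hg, List.mem_cons]
    constructor
    · rintro ((h | h) | ⟨y, hy, h⟩)
      · exact Or.inl h
      · exact Or.inr ⟨x, Or.inl rfl, h⟩
      · exact Or.inr ⟨y, Or.inr hy, h⟩
    · rintro (h | ⟨y, (rfl | hy), h⟩)
      · exact Or.inl (Or.inl h)
      · exact Or.inl (Or.inr h)
      · exact Or.inr ⟨y, hy, h⟩

-- every index in enumerate xs s is ≥ s
theorem enumerate_fst_ge {α : Type} : ∀ (xs : List α) (s : Int) (p : Int × α),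
    p ∈ PySem.List.enumerate xs s → s ≤ p.1 := by
  intro xs
  induction xs with
  | nil => simp [PySem.List.enumerate_nil]
  | cons x t ih =>
    intro s p hp
    rw [PySem.List.enumerate_cons, List.mem_cons] at hp
    rcases hp with rfl | hp
    · simp
    · have := ih (s + 1) p hp; omega

-- within enumerate, the index determines the element
theorem enumerate_fst_det {α : Type} : ∀ (xs : List α) (s : Int) (p q : Int × α),
    p ∈ PySem.List.enumerate xs s → q ∈ PySem.List.enumerate xs s → p.1 = q.1 → p.2 = q.2 := by
  intro xs
  induction xs with
  | nil => simp [PySem.List.enumerate_nil]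
  | cons x t ih =>
    intro s p q hp hq h
    rw [PySem.List.enumerate_cons, List.mem_cons] at hp hq
    rcases hp with hp | hp <;> rcases hq with hq | hq
    · rw [hp, hq]
    · have := enumerate_fst_ge t (s + 1) q hq; rw [hp] at h; omega
    · have := enumerate_fst_ge t (s + 1) p hp; rw [hq] at h; omega
    · exact ih (s + 1) p q hp hq h

-- enumerate commutes with map
theorem enumerate_map {α β : Type} (f : α → β) : ∀ (xs : List α) (s : Int),
    PySem.List.enumerate (xs.map f) s = (PySem.List.enumerate xs s).map (fun p => (p.1, f p.2)) := by
  intro xs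
  induction xs with
  | nil => simp [PySem.List.enumerate_nil]
  | cons x t ih => intro s; simp [PySem.List.enumerate_cons, ih]

-- filtering enumerate by a predicate on the element, then dropping indices, is plain filter
theorem enum_filter_map {α : Type} (g : α → Bool) : ∀ (xs : List α) (s : Int),
    ((PySem.List.enumerate xs s).filter (fun p => g p.2)).map (·.2) = xs.filter g := by
  intro xs
  induction xs with
  | nil => simp [PySem.List.enumerate_nil]
  | cons x t ih =>
    intro s
    rw [PySem.List.enumerate_cons]
    by_cases h : g x <;> simp [h, ih]

-- A's break-loop over preferences matches iff some synonym of some preference matches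
theorem prefLoopA_iff (prefs : List String) (d : String) :
    prefLoopA prefs d = true ↔ ∃ pref ∈ prefs,
      ∃ syn ∈ DIET_SYNONYMS.getD (PySem.Str.lower pref) [PySem.Str.lower pref],
        PySem.Str.isIn syn d = true := by
  induction prefs with
  | nil => simp [prefLoopA]
  | cons p rest ih =>
    simp only [prefLoopA, List.mem_cons]
    split
    · rename_i h
      simp only [List.any_eq_true] at h
      obtain ⟨syn, hs, hin⟩ := h
      simp only [true_iff]
      exact ⟨p, Or.inl rfl, syn, hs, hin⟩
    · rename_i h
      simp only [List.any_eq_true] at h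
      rw [ih]
      constructor
      · rintro ⟨pref, hp, hrest⟩; exact ⟨pref, Or.inr hp, hrest⟩
      · rintro ⟨pref, (rfl | hp), syn, hs, hin⟩
        · exact absurd ⟨syn, hs, hin⟩ h
        · exact ⟨pref, hp, syn, hs, hin⟩

-- membership in B's matched set
theorem mem_matched (diets : List String) (prefs : List String) (i : Int) :
    i ∈ prefs.foldl (fun m pref =>
        let p := PySem.Str.lower pref
        (DIET_SYNONYMS.getD p [p]).foldl (fun m syn =>
          (PySem.List.enumerate diets).foldl (fun m id =>
            if PySem.Str.isIn syn id.2 then PySem.Set.add m id.1 else m) m) m) PySem.Set.empty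
      ↔ ∃ pref ∈ prefs,
          ∃ syn ∈ DIET_SYNONYMS.getD (PySem.Str.lower pref) [PySem.Str.lower pref],
            ∃ q ∈ PySem.List.enumerate diets 0, PySem.Str.isIn syn q.2 = true ∧ i = q.1 := by
  rw [mem_foldl_iff _ (fun pref i => ∃ syn ∈ DIET_SYNONYMS.getD (PySem.Str.lower pref) [PySem.Str.lower pref],
        ∃ q ∈ PySem.List.enumerate diets 0, PySem.Str.isIn syn q.2 = true ∧ i = q.1)]
  · simp [PySem.Set.empty]
  · intro m pref i
    rw [mem_foldl_iff _ (fun syn i => ∃ q ∈ PySem.List.enumerate diets 0, PySem.Str.isIn syn q.2 = true ∧ i = q.1)]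
    intro m syn i
    rw [mem_foldl_iff _ (fun q i => PySem.Str.isIn syn q.2 = true ∧ i = q.1)]
    intro m q i
    split
    · rename_i h
      rw [PySem.Set.mem_add]
      constructor
      · rintro (hm | rfl)
        · exact Or.inl hm
        · exact Or.inr ⟨h, rfl⟩
      · rintro (hm | ⟨_, rfl⟩)
        · exact Or.inl hm
        · exact Or.inr rfl
    · rename_i h
      constructor
      · exact Or.inl
      · rintro (hm | ⟨h1, _⟩)
        · exact hm
        · exact absurd h1 h

-- ===== VERDICT (by name: the statement is the Claim_ definition above) =====
theorem filter_recipes_by_diet_spec : Claim_equal_filter_recipes_by_diet := by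
  intro recipes prefs _
  unfold Spec_filter_recipes_by_diet filter_recipes_by_diet filter_recipes_by_diet_alt
  split
  · rfl
  · rw [PySem.List.foldl_append_if_eq_filter]
    simp only [List.nil_append]
    rw [← enum_filter_map (fun r => prefLoopA prefs (PySem.Str.lower ((PySem.Dict.mk r).getD "diet" ""))) recipes 0]
    congr 1
    apply List.filter_congr
    intro p hp
    rw [Bool.eq_iff_iff, PySem.Set.contains_iff, mem_matched, prefLoopA_iff]
    constructor
    · rintro ⟨pref, hpr, syn, hs, hin⟩
      refine ⟨pref, hpr, syn, hs,
        ((p.1, PySem.Str.lower ((PySem.Dict.mk p.2).getD "diet" "")) : Int × String), ?_, hin, rfl⟩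
      rw [enumerate_map]
      exact List.mem_map.mpr ⟨p, hp, rfl⟩
    · rintro ⟨pref, hpr, syn, hs, q, hq, hin, hi⟩
      refine ⟨pref, hpr, syn, hs, ?_⟩
      rw [enumerate_map] at hq
      obtain ⟨q', hq', rfl⟩ := List.mem_map.mp hq
      have hmem : ((p.1, PySem.Str.lower ((PySem.Dict.mk p.2).getD "diet" "")) : Int × String)
          ∈ PySem.List.enumerate (recipes.map (fun r => PySem.Str.lower ((PySem.Dict.mk r).getD "diet" ""))) 0 := by
        rw [enumerate_map]
        exact List.mem_map.mpr ⟨p, hp, rfl⟩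
      rw [enumerate_map] at hmem
      obtain ⟨p', hp', hpe⟩ := List.mem_map.mp hmem
      have h2 : p'.2 = q'.2 := enumerate_fst_det recipes 0 p' q' hp' hq' (by
        have h1 := congrArg Prod.fst hpe
        simp only [] at h1 hi
        omega)
      have h3 := congrArg Prod.snd hpe
      simp only [] at h3 hin
      rw [← h3, h2]
      exact hin
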